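-- pv_equiv track=rewrite | github.com/Rojoloter/FIUBA-TPs | Algoritmos y programación I/TP1 - Unruly/unruly.py | columna_es_valida
-- ===== SOURCE A (Python) =====
-- from typing import List, Tuple, Any
--
-- Grilla = Any
--
-- def columna_es_valida(grilla: Grilla, col: int) -> bool:
--     """Devuelve un booleano indicando si la columna de la grilla denotada por
--     el índice `col` es considerada válida.
--
--     Las condiciones para que una columna sea válida son las mismas que las
--     condiciones de las filas."""
--     columna_analizada = ""
--     for i in range (len(grilla)):
--         columna_analizada += grilla[i][col]
--
--     contador_de_1 = columna_analizada.count("1")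
--     contador_de_0 = columna_analizada.count("0")
--     if contador_de_0 == contador_de_1:
--         if " " not in columna_analizada:
--             if  "111" not in columna_analizada and "000" not in columna_analizada:
--                 return True
--     return False
-- ===== SOURCE B (Python) =====
-- def columna_es_valida(grilla, col):
--     """Single pass down the rows: count ones/zeros, flag spaces, and detect a
--     run of three equal '0'/'1' cells via the last two seen characters —
--     no column string is built and no substring searches are made."""
--     ones = 0
--     zeros = 0
--     ok = True
--     p2 = None
--     p1 = None
--     for fila in grilla:
--         c = fila[col]
--         if c == '1':
--             ones += 1
--         elif c == '0':
--             zeros += 1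
--         elif c == ' ':
--             ok = False
--         if (c == '1' or c == '0') and c == p1 and c == p2:
--             ok = False
--         p2, p1 = p1, c
--     return ok and ones == zeros
-- ===== Notes on version B (the rewrite author's own statement) =====
-- stated objective: simpler
-- what changed: Instead of building the column string and scanning it four times (two .count calls, a space membership test, two substring searches), B makes one pass over the rows keeping counters for '1'/'0', an ok flag for spaces and '111'/'000' runs detected via the last two characters seen.
import Mathlib
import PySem

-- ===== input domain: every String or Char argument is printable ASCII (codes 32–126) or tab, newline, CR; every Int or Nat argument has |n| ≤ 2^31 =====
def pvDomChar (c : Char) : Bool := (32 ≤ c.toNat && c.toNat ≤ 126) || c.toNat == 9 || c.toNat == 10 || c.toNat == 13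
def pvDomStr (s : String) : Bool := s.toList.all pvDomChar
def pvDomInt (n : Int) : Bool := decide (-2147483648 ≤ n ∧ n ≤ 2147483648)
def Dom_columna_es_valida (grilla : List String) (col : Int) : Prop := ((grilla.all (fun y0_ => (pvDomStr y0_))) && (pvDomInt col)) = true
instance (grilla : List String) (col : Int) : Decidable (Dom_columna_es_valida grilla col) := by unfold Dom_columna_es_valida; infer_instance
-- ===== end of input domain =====

-- B changes the decomposition only: one pass down the rows with counters and flags instead
-- of building the column string and scanning it four more times; proved equal on Pre_.

-- ===== PORT A =====
-- A: columna_analizada = "" ; for i in range(len(grilla)): columna_analizada += grilla[i][col]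
-- then counts of "1"/"0", " " membership, and "111"/"000" substring tests, as nested ifs.
def columna_es_valida (grilla : List String) (col : Int) : Bool :=
  let columna : List Char :=
    (PySem.List.pyRange 0 (grilla.length : Int) 1).foldl
      (fun acc i =>
        acc ++ ((PySem.Chars.pyGet? (PySem.List.pyGetD grilla i "").toList col).map
                  (fun c => [c])).getD [])
      []
  let contador_de_1 := PySem.Chars.count columna ['1']
  let contador_de_0 := PySem.Chars.count columna ['0']
  if contador_de_0 == contador_de_1 then
    if PySem.Chars.isIn [' '] columna = false then
      if PySem.Chars.isIn ['1', '1', '1'] columna = false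
          && PySem.Chars.isIn ['0', '0', '0'] columna = false then
        true
      else false
    else false
  else false

-- ===== PORT B =====
-- one step of B's loop; state: (ones, zeros, ok, p2, p1), p2/p1 the last two characters seen
def pvStepB (st : Int × Int × Bool × Option Char × Option Char) (c : Char) :
    Int × Int × Bool × Option Char × Option Char :=
  let (ones, zeros, ok, p2, p1) := st
  let (ones, zeros, ok) :=
    if c = '1' then (ones + 1, zeros, ok)
    else if c = '0' then (ones, zeros + 1, ok)
    else if c = ' ' then (ones, zeros, false)
    else (ones, zeros, ok)
  let ok := if (c = '1' ∨ c = '0') ∧ some c = p1 ∧ some c = p2 then false else ok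
  (ones, zeros, ok, p1, some c)

def columna_es_valida_alt (grilla : List String) (col : Int) : Bool :=
  let st := grilla.foldl
    (fun st fila => pvStepB st ((PySem.Chars.pyGet? fila.toList col).getD '?'))
    (0, 0, true, none, none)
  st.2.2.1 && decide (st.1 = st.2.1)

-- ===== PRECONDITION & SPEC =====
-- Pre_ excludes exactly the inputs on which A raises IndexError: some row too short for col.
def Pre_columna_es_valida (grilla : List String) (col : Int) : Prop :=
  ∀ s ∈ grilla, -(s.toList.length : Int) ≤ col ∧ col < (s.toList.length : Int)
instance (grilla : List String) (col : Int) : Decidable (Pre_columna_es_valida grilla col) := by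
  unfold Pre_columna_es_valida; infer_instance

def pvWitness_columna_es_valida : List String × Int := (["10", "01"], 0)

def Spec_columna_es_valida (grilla : List String) (col : Int) (out : Bool) : Prop := out = columna_es_valida_alt grilla col
instance (grilla : List String) (col : Int) (out : Bool) : Decidable (Spec_columna_es_valida grilla col out) := by unfold Spec_columna_es_valida; infer_instance

-- ===== CLAIM (what is proved, stated in full; the proofs are below) =====
def Claim_equal_columna_es_valida : Prop := ∀ (grilla : List String) (col : Int), Dom_columna_es_valida grilla col → Pre_columna_es_valida grilla col → Spec_columna_es_valida grilla col (columna_es_valida grilla col)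

-- ===== LEMMAS AND PROOFS =====

-- recursive "has a run of three x" predicate used to characterise both programs
def pvTrip (x : Char) : List Char → Bool
  | a :: b :: c :: t => (a = x && b = x && c = x) || pvTrip x (b :: c :: t)
  | _ => false

-- the triple detector of B's loop, with the last two seen characters as context
def pvTripB (p2 p1 : Option Char) : List Char → Bool
  | [] => false
  | c :: t => ((c = '1' ∨ c = '0') ∧ some c = p1 ∧ some c = p2 : Bool) || pvTripB p1 (some c) t

def pvLst (p1 : Option Char) : List Char → Option Char
  | [] => p1
  | c :: t => pvLst (some c) t

def pvPen (p2 p1 : Option Char) : List Char → Option Char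
  | [] => p2
  | c :: t => pvPen p1 (some c) t

lemma pvTrip_iff_infix (x : Char) : ∀ cs : List Char, pvTrip x cs = true ↔ [x, x, x] <:+: cs := by
  intro cs
  induction cs with
  | nil => simp [pvTrip]
  | cons a t ih =>
    match t, ih with
    | [], _ => simp [pvTrip]; intro h; have := h.length_le; simp at this
    | [b], _ => simp [pvTrip]; intro h; have := h.length_le; simp at this
    | b :: c :: t, ih =>
      rw [List.infix_cons_iff]
      simp only [pvTrip, Bool.or_eq_true, decide_eq_true_eq, Bool.and_eq_true] at *
      rw [ih]
      constructor
      · rintro (⟨⟨rfl, rfl⟩, rfl⟩ | h)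
        · exact Or.inl ⟨t, rfl⟩
        · exact Or.inr h
      · rintro (⟨l, hl⟩ | h)
        · left; injection hl with h1 hl; injection hl with h2 hl; injection hl with h3 _
          simp_all
        · exact Or.inr h

lemma pvTripB_eq (t : List Char) : ∀ a b : Char,
    pvTripB (some b) (some a) t = (pvTrip '1' (b :: a :: t) || pvTrip '0' (b :: a :: t)) := by
  induction t with
  | nil => intro a b; simp [pvTripB, pvTrip]
  | cons c t ih =>
    intro a b
    simp only [pvTripB, pvTrip, ih]
    by_cases h1 : c = '1' <;> by_cases h0 : c = '0' <;>
      by_cases ha : a = c <;> by_cases hb : b = c <;>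
      simp_all <;> tauto

lemma pvTripB_nil_nil (cs : List Char) :
    pvTripB none none cs = (pvTrip '1' cs || pvTrip '0' cs) := by
  match cs with
  | [] => rfl
  | [c] => simp [pvTripB, pvTrip]
  | a :: b :: t => simp only [pvTripB, pvTripB_eq]; simp

lemma pvGo_singleton (x : Char) : ∀ (l : List Char) (fuel acc : Nat), l.length ≤ fuel →
    PySem.Chars.count.go [x] fuel l acc = acc + l.count x := by
  intro l
  induction l with
  | nil => intro fuel acc h; cases fuel <;> simp [PySem.Chars.count.go]
  | cons a t ih =>
    intro fuel acc h
    cases fuel with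
    | zero => simp at h
    | succ n =>
      simp only [PySem.Chars.count.go]
      by_cases hx : a = x
      · subst hx
        simp [List.isPrefixOf, ih n (acc + 1) (by simpa using h)]
        omega
      · simp [List.isPrefixOf, Ne.symm hx, hx, ih n acc (by simpa using h)]

lemma pvCount_singleton (x : Char) (cs : List Char) :
    PySem.Chars.count cs [x] = cs.count x := by
  simp [PySem.Chars.count, pvGo_singleton x cs cs.length 0 le_rfl]

lemma pvIsIn_singleton (x : Char) (cs : List Char) :
    PySem.Chars.isIn [x] cs = cs.contains x := by
  rcases h : cs.contains x with _ | _
  · rw [PySem.Chars.isIn_eq_false_iff, List.singleton_infix_iff]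
    simpa using h
  · rw [PySem.Chars.isIn_iff_infix, List.singleton_infix_iff]
    simpa using h

lemma pvIsIn_trip (x : Char) (cs : List Char) :
    PySem.Chars.isIn [x, x, x] cs = pvTrip x cs := by
  rcases h : pvTrip x cs with _ | _
  · rw [PySem.Chars.isIn_eq_false_iff]
    rw [← pvTrip_iff_infix, h]; simp
  · rw [PySem.Chars.isIn_iff_infix, ← pvTrip_iff_infix]; exact h

lemma pvGet_some (l : List Char) (i : Int) (h1 : -(l.length : Int) ≤ i)
    (h2 : i < (l.length : Int)) : ∃ c, PySem.List.pyGet? l i = some c := by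
  simp [PySem.List.pyGet?, PySem.List.pyIdx?]
  split_ifs with h <;> simp [List.getElem?_eq_some_iff] <;> omega

lemma pvFoldB (cs : List Char) : ∀ (ones zeros : Int) (ok : Bool) (p2 p1 : Option Char),
    cs.foldl pvStepB (ones, zeros, ok, p2, p1) =
      (ones + cs.count '1', zeros + cs.count '0',
       ok && !(cs.contains ' ') && !(pvTripB p2 p1 cs),
       pvPen p2 p1 cs, pvLst p1 cs) := by
  induction cs with
  | nil => intro ones zeros ok p2 p1; simp [pvTripB, pvPen, pvLst]
  | cons c t ih =>
    intro ones zeros ok p2 p1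
    simp only [List.foldl_cons, pvStepB, ih, pvTripB, pvPen, pvLst, List.count_cons,
      List.contains_cons]
    by_cases h1 : c = '1' <;> by_cases h0 : c = '0' <;> by_cases hs : c = ' ' <;>
      by_cases hp : some c = p1 ∧ some c = p2 <;>
      simp_all [Prod.ext_iff] <;> repeat' apply And.intro
    all_goals try ring
    all_goals try (cases ok <;> cases (t.contains ' ') <;> simp_all)
    all_goals (cases (decide (' ' ∈ t)) <;> simp) <;> (intro hx heq; subst heq; simp_all)

-- ===== VERDICT (by name: the statement is the Claim_ definition above) =====
theorem columna_es_valida_spec : Claim_equal_columna_es_valida := by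
  intro grilla col _ hpre
  unfold Spec_columna_es_valida columna_es_valida columna_es_valida_alt
  simp only []
  rw [PySem.List.foldl_pyRange_zero_pyGetD' grilla ""
      (fun acc s => acc ++ ((PySem.Chars.pyGet? s.toList col).map (fun c => [c])).getD []) []]
  have hcol : grilla.foldl
      (fun acc s => acc ++ ((PySem.Chars.pyGet? s.toList col).map (fun c => [c])).getD []) [] =
      grilla.map (fun s => (PySem.Chars.pyGet? s.toList col).getD '?') := by
    rw [PySem.List.foldl_congr_mem grilla _
        (fun acc s => acc ++ [(PySem.Chars.pyGet? s.toList col).getD '?']) []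
        (by intro acc s hs
            obtain ⟨c, hc⟩ := pvGet_some s.toList col (hpre s hs).1 (hpre s hs).2
            simp only [PySem.Chars.pyGet?_eq_listPyGet?, hc, Option.map_some,
              Option.getD_some]),
      PySem.List.foldl_append_singleton_eq_map]
    simp
  rw [hcol, ← List.foldl_map, pvFoldB]
  set cs := grilla.map (fun s => (PySem.Chars.pyGet? s.toList col).getD '?') with hcs
  simp only [pvCount_singleton, pvIsIn_singleton, pvIsIn_trip, pvTripB_nil_nil]
  rcases h1 : pvTrip '1' cs with _ | _ <;> rcases h0 : pvTrip '0' cs with _ | _ <;>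
    rcases hsp : cs.contains ' ' with _ | _ <;>
    rcases hc : (cs.count '0' == cs.count '1') with _ | _ <;>
    simp_all <;> omega
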